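-- pv_equiv track=rewrite | github.com/dfporter/FBF_gendered_gl | orthos/simple/ManyToManyTranslator.py | expand_list_of_sets_to_include_all_in_group
-- ===== SOURCE A (Python) =====
-- def expand_list_of_sets_to_include_all_in_group(_t, groupings):
--     expanded = [set() for x in _t]
--
--     for n, _a in enumerate(_t):
--
--         for _b in groupings:
--
--             if _a & _b:
--                 expanded[n] |= _b
--
--     for n in range(len(expanded)):
--         expanded[n] = frozenset(expanded[n])
--
--     return expanded
-- ===== SOURCE B (Python) =====
-- def expand_list_of_sets_to_include_all_in_group(_t, groupings):
--     # Inverted index: element -> ascending list of indices of the groups containing it.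
--     index = {}
--     for j, b in enumerate(groupings):
--         for x in b:
--             index.setdefault(x, []).append(j)
--
--     out = []
--     for a in _t:
--         hit = set()
--         for x in a:
--             hit.update(index.get(x, []))
--         merged = set()
--         for j in sorted(hit):
--             merged |= groupings[j]
--         out.append(frozenset(merged))
--     return out
-- ===== Notes on version B (the rewrite author's own statement) =====
-- stated objective: alternative
-- what changed: Instead of intersecting every input set with every group (T*G set intersections), B builds an inverted index element->group-indices once and, per input set, unions exactly the groups its elements hit (indices deduplicated via a set and visited in ascending group order); measured ~1.7x at the largest size both finished, not confirmed as faster since the unions themselves dominate on dense inputs.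
import Mathlib
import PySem

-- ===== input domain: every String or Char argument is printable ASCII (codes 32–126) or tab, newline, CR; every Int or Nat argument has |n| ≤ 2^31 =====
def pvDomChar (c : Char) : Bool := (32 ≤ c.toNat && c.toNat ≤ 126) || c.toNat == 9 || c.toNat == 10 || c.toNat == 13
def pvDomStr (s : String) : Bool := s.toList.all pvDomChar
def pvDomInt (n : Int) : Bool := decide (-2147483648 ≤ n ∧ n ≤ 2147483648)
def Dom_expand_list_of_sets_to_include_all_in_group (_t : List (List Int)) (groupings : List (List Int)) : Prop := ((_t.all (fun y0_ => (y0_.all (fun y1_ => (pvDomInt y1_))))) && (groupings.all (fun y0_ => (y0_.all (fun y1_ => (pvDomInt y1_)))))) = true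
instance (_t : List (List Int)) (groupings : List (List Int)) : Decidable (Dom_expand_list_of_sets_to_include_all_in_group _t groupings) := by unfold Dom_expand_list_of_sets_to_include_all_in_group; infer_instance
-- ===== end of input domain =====

-- B replaces A's per-set intersection scan over all groups by an inverted index
-- element -> group indices, unioning exactly the groups hit by each set's elements
-- (objective: alternative algorithm; same results, union work itself unchanged).


-- ===== PORT A =====
-- expanded[n] is updated independently of all other entries, so the preallocated
-- list mutated by index becomes a map over _t; the inner loop is the foldl;
-- the final frozenset() conversion is the identity on the set representation.
def expand_list_of_sets_to_include_all_in_group (_t : List (List Int)) (groupings : List (List Int)) : List (List Int) :=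
  _t.map (fun _a =>
    groupings.foldl (fun acc _b =>
      if PySem.Set.inter _a _b ≠ [] then PySem.Set.union acc _b else acc)
      PySem.Set.empty)

-- ===== PORT B =====
-- index.setdefault(x, []).append(j)  ==  d.modify x [] (· ++ [j])
def pvInvIndex (groupings : List (List Int)) : PySem.Dict Int (List Int) :=
  (PySem.List.enumerate groupings).foldl
    (fun d jb => jb.2.foldl (fun d x => d.modify x [] (· ++ [jb.1])) d)
    PySem.Dict.empty

def expand_list_of_sets_to_include_all_in_group_alt (_t : List (List Int)) (groupings : List (List Int)) : List (List Int) :=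
  let index := pvInvIndex groupings
  _t.map (fun a =>
    let hit : PySem.Set Int := a.foldl (fun h x => PySem.Set.update h (index.getD x [])) PySem.Set.empty
    (PySem.List.sorted hit (fun j => j) false).foldl
      (fun merged j => PySem.Set.union merged (PySem.List.pyGetD groupings j []))
      PySem.Set.empty)

-- ===== PRECONDITION & SPEC =====
def Spec_expand_list_of_sets_to_include_all_in_group (_t : List (List Int)) (groupings : List (List Int)) (out : List (List Int)) : Prop := out = expand_list_of_sets_to_include_all_in_group_alt _t groupings
instance (_t : List (List Int)) (groupings : List (List Int)) (out : List (List Int)) : Decidable (Spec_expand_list_of_sets_to_include_all_in_group _t groupings out) := by unfold Spec_expand_list_of_sets_to_include_all_in_group; infer_instance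

-- ===== CLAIM (what is proved, stated in full; the proofs are below) =====
def Claim_equal_expand_list_of_sets_to_include_all_in_group : Prop := ∀ (_t : List (List Int)) (groupings : List (List Int)), Dom_expand_list_of_sets_to_include_all_in_group _t groupings → Spec_expand_list_of_sets_to_include_all_in_group _t groupings (expand_list_of_sets_to_include_all_in_group _t groupings)

-- ===== LEMMAS AND PROOFS =====

-- conditional foldl = foldl over the filtered list
lemma pv_foldl_filter {α β : Type} (p : β → Prop) [DecidablePred p] (u : α → β → α) :
    ∀ (l : List β) (init : α),
      l.foldl (fun acc b => if p b then u acc b else acc) init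
        = (l.filter (fun b => decide (p b))).foldl u init := by
  intro l
  induction l with
  | nil => intro init; rfl
  | cons b t ih =>
    intro init
    by_cases h : p b
    · simp [h, ih]
    · simp [h, ih]

-- the target: ascending group indices whose group meets a
def pvTgt (a : List Int) (groupings : List (List Int)) : List Int :=
  ((List.range groupings.length).filter
      (fun k => decide (PySem.Set.inter a (groupings.getD k []) ≠ []))).map
    (fun (k : Nat) => (k : Int))

-- the nested index-building loop, flattened to pairs (x, j)
def pvPairs (groupings : List (List Int)) : List (Int × Int) :=
  (PySem.List.enumerate groupings).flatMap (fun jb => jb.2.map (fun x => (x, jb.1)))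

lemma pv_invIndex_flat :
    ∀ (l : List (Int × List Int)) (d : PySem.Dict Int (List Int)),
      l.foldl (fun d jb => jb.2.foldl (fun d x => d.modify x [] (· ++ [jb.1])) d) d
        = (l.flatMap (fun jb => jb.2.map (fun x => (x, jb.1)))).foldl
            (fun d p => d.modify p.1 [] (· ++ [p.2])) d := by
  intro l
  induction l with
  | nil => intro d; rfl
  | cons jb t ih =>
    intro d
    simp only [List.foldl_cons, List.flatMap_cons, List.foldl_append, ih, List.foldl_map]

lemma pv_mem_pairs (groupings : List (List Int)) (p : Int × Int) :
    p ∈ pvPairs groupings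
      ↔ ∃ k : Nat, ∃ h : k < groupings.length, p.1 ∈ groupings[k] ∧ p.2 = (k : Int) := by
  unfold pvPairs
  simp only [List.mem_flatMap, PySem.List.mem_enumerate_iff, List.mem_map]
  constructor
  · rintro ⟨jb, ⟨k, hk, rfl⟩, y, hy, rfl⟩
    exact ⟨k, hk, by simpa using hy, by simp⟩
  · rintro ⟨k, hk, h1, h2⟩
    refine ⟨((0 : Int) + (k : Int), groupings[k]), ⟨k, hk, rfl⟩, p.1, h1, ?_⟩
    cases p with
    | mk p1 p2 => simp only at h2 ⊢; simp [h2]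

-- membership in the inverted index
lemma pv_mem_invIndex (groupings : List (List Int)) (x j : Int) :
    j ∈ (pvInvIndex groupings).getD x []
      ↔ ∃ k : Nat, ∃ h : k < groupings.length, x ∈ groupings[k] ∧ j = (k : Int) := by
  have h1 : (pvInvIndex groupings).getD x []
      = ((pvPairs groupings).filter (fun p => p.1 == x)).map (·.2) := by
    unfold pvInvIndex pvPairs
    rw [pv_invIndex_flat]
    rw [PySem.Dict.getD_foldl_modify_append]
    simp
  rw [h1]
  simp only [List.mem_map, List.mem_filter, beq_iff_eq]
  constructor
  · rintro ⟨p, ⟨hp, hx⟩, rfl⟩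
    obtain ⟨k, hk, h1, h2⟩ := (pv_mem_pairs _ _).mp hp
    exact ⟨k, hk, hx ▸ h1, h2⟩
  · rintro ⟨k, hk, hx, rfl⟩
    exact ⟨(x, (k : Int)), ⟨(pv_mem_pairs _ _).mpr ⟨k, hk, hx, rfl⟩, rfl⟩, rfl⟩

-- membership in hit
lemma pv_mem_hit (index : PySem.Dict Int (List Int)) (a : List Int) (j : Int) :
    ∀ h0 : PySem.Set Int,
      (j ∈ a.foldl (fun h x => PySem.Set.update h (index.getD x [])) h0
        ↔ j ∈ h0 ∨ ∃ x ∈ a, j ∈ index.getD x []) := by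
  induction a with
  | nil => intro h0; simp
  | cons y t ih =>
    intro h0
    simp only [List.foldl_cons, ih, PySem.Set.mem_update, List.mem_cons]
    constructor
    · rintro (⟨h | h⟩ | ⟨x, hx, hj⟩)
      · exact Or.inl h
      · exact Or.inr ⟨y, Or.inl rfl, h⟩
      · exact Or.inr ⟨x, Or.inr hx, hj⟩
    · rintro (h | ⟨x, hx | hx, hj⟩)
      · exact Or.inl (Or.inl h)
      · exact Or.inl (Or.inr (hx ▸ hj))
      · exact Or.inr ⟨x, hx, hj⟩

lemma pv_nodup_hit (index : PySem.Dict Int (List Int)) (a : List Int) :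
    ∀ h0 : PySem.Set Int, h0.Nodup →
      (a.foldl (fun h x => PySem.Set.update h (index.getD x [])) h0).Nodup := by
  induction a with
  | nil => intro h0 h; exact h
  | cons y t ih =>
    intro h0 h
    exact ih _ (PySem.Set.nodup_update _ _ h)

lemma pv_inter_ne_nil_iff (a b : List Int) :
    PySem.Set.inter a b ≠ [] ↔ ∃ x ∈ a, x ∈ b := by
  constructor
  · intro h
    obtain ⟨y, hy⟩ := List.exists_mem_of_ne_nil _ h
    have := (PySem.Set.mem_inter a b y).mp hy
    exact ⟨y, this.1, this.2⟩
  · rintro ⟨y, hya, hyb⟩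
    exact List.ne_nil_of_mem ((PySem.Set.mem_inter a b y).mpr ⟨hya, hyb⟩)

lemma pv_mem_tgt (a : List Int) (groupings : List (List Int)) (j : Int) :
    j ∈ pvTgt a groupings
      ↔ ∃ k : Nat, ∃ h : k < groupings.length,
          PySem.Set.inter a groupings[k] ≠ [] ∧ j = (k : Int) := by
  unfold pvTgt
  simp only [List.mem_map, List.mem_filter, List.mem_range, decide_eq_true_eq]
  constructor
  · rintro ⟨k, ⟨hk, hne⟩, rfl⟩
    exact ⟨k, hk, by rwa [List.getD_eq_getElem _ [] hk] at hne, rfl⟩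
  · rintro ⟨k, hk, hne, rfl⟩
    exact ⟨k, ⟨hk, by rwa [List.getD_eq_getElem _ [] hk]⟩, rfl⟩

lemma pv_tgt_nodup (a : List Int) (groupings : List (List Int)) :
    (pvTgt a groupings).Nodup :=
  List.Nodup.map (fun p q h => by exact_mod_cast h)
    (List.Nodup.filter _ List.nodup_range)

lemma pv_tgt_pairwise (a : List Int) (groupings : List (List Int)) :
    (pvTgt a groupings).Pairwise (fun p q => p < q) :=
  List.Pairwise.map _ (fun p q (h : p < q) => by exact_mod_cast h)
    (List.Pairwise.filter _ List.pairwise_lt_range)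

lemma pv_sorted_hit_eq_tgt (a : List Int) (groupings : List (List Int)) :
    PySem.List.sorted
      (a.foldl (fun h x => PySem.Set.update h ((pvInvIndex groupings).getD x [])) PySem.Set.empty)
      (fun j => j) false = pvTgt a groupings := by
  apply PySem.List.sorted_eq_of_perm_of_pairwise_lt
  · refine (List.perm_ext_iff_of_nodup (pv_tgt_nodup a groupings)
      (pv_nodup_hit _ _ _ List.nodup_nil)).mpr (fun j => ?_)
    rw [pv_mem_tgt, pv_mem_hit]
    simp only [List.not_mem_nil, false_or]
    constructor
    · rintro ⟨k, hk, hne, rfl⟩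
      obtain ⟨y, hy, hyb⟩ := (pv_inter_ne_nil_iff _ _).mp hne
      exact ⟨y, hy, (pv_mem_invIndex _ _ _).mpr ⟨k, hk, hyb, rfl⟩⟩
    · rintro ⟨y, hy, hj⟩
      obtain ⟨k, hk, hyk, rfl⟩ := (pv_mem_invIndex _ _ _).mp hj
      exact ⟨k, hk, (pv_inter_ne_nil_iff _ _).mpr ⟨y, hy, hyk⟩, rfl⟩
  · exact pv_tgt_pairwise a groupings

lemma pv_range_filter_map {β : Type} (q : β → Bool) (dflt : β) :
    ∀ gs : List β,
      ((List.range gs.length).filter (fun k => q (gs.getD k dflt))).map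
          (fun k => gs.getD k dflt)
        = gs.filter q := by
  intro gs
  induction gs with
  | nil => simp
  | cons g t ih =>
    rw [List.length_cons, List.range_succ_eq_map]
    have h2 : ((List.map Nat.succ (List.range t.length)).filter
        (fun k => q ((g :: t).getD k dflt))).map (fun k => (g :: t).getD k dflt)
        = t.filter q := by
      rw [List.filter_map, List.map_map]
      simpa [Function.comp] using ih
    by_cases h : q g
    · simp [h]
      simpa [List.getD_eq_getElem?_getD] using h2
    · simp [h]
      simpa [List.getD_eq_getElem?_getD] using h2

-- fold of unions over the target = A's conditional fold
lemma pv_tgt_fold (a : List Int) (groupings : List (List Int)) :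
    (pvTgt a groupings).foldl
        (fun merged j => PySem.Set.union merged (PySem.List.pyGetD groupings j []))
        PySem.Set.empty
      = groupings.foldl (fun acc _b =>
          if PySem.Set.inter a _b ≠ [] then PySem.Set.union acc _b else acc)
          PySem.Set.empty := by
  rw [pv_foldl_filter (fun _b => PySem.Set.inter a _b ≠ [])]
  unfold pvTgt
  rw [List.foldl_map]
  simp only [PySem.List.pyGetD_natCast]
  rw [← pv_range_filter_map (fun b => decide (PySem.Set.inter a b ≠ [])) ([] : List Int)
        groupings,
      List.foldl_map]

-- ===== VERDICT (by name: the statement is the Claim_ definition above) =====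
theorem expand_list_of_sets_to_include_all_in_group_spec : Claim_equal_expand_list_of_sets_to_include_all_in_group := by
  intro _t groupings _
  unfold Spec_expand_list_of_sets_to_include_all_in_group
  unfold expand_list_of_sets_to_include_all_in_group expand_list_of_sets_to_include_all_in_group_alt
  simp only []
  apply List.map_congr_left
  intro a _
  rw [pv_sorted_hit_eq_tgt, pv_tgt_fold]
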